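-- pv_equiv track=rewrite | github.com/mauritz2/advent-of-code-2023 | day-11-part-1.py | find_all_galaxies
-- ===== SOURCE A (Python) =====
-- def find_all_galaxies(universe: list[list[str]]) -> dict[int, tuple[int]]:
--     galaxy_locs = {}
--     galaxy_num = 1
--     for y, row_data in enumerate(universe):
--         last_x = 0
--         while row_data.find("#", last_x) != -1:
--             x = row_data.find("#", last_x)
--             last_x = x + 1
--             galaxy_locs[galaxy_num] = (y, x)
--             galaxy_num += 1
--     return galaxy_locs
-- ===== SOURCE B (Python) =====
-- def find_all_galaxies(universe: list[list[str]]) -> dict[int, tuple[int]]: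
--     galaxy_locs = {}
--     galaxy_num = 1
--     for y, row_data in enumerate(universe):
--         for x, ch in enumerate(row_data):
--             if ch == "#":
--                 galaxy_locs[galaxy_num] = (y, x)
--                 galaxy_num += 1
--     return galaxy_locs
-- ===== Notes on version B (the rewrite author's own statement) =====
-- stated objective: idiomatic
-- what changed: Replaces the per-row while-loop that repeatedly calls str.find('#', last_x) with a direct character-by-character enumerate scan that tests each cell for equality.
import Mathlib
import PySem

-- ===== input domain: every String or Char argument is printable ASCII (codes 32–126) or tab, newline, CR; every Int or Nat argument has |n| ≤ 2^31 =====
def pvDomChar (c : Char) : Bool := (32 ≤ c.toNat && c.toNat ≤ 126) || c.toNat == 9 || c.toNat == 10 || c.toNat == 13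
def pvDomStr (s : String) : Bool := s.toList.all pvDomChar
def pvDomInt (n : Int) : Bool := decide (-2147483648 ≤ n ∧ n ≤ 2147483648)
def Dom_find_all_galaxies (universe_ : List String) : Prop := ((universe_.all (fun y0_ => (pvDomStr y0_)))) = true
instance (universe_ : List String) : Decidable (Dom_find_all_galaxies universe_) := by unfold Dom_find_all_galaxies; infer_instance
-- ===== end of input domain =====

-- B replaces A's per-row while-loop over str.find("#", last_x) with a direct
-- character-by-character enumerate scan; same cost, more idiomatic.


-- ===== PORT A =====
-- inner while-loop of A; `fuel` only makes the recursion structural: started with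
-- row.length + 1 it never runs out (last_x strictly increases and stays ≤ row length).
def loopA (y : Int) (row : String) (fuel : Nat) (last_x : Nat)
    (st : List (Int × Int × Int) × Int) : List (Int × Int × Int) × Int :=
  match fuel with
  | 0 => st
  | fuel + 1 =>
    if PySem.Str.findFrom row "#" (last_x : Int) ≠ -1 then
      let x := PySem.Str.findFrom row "#" (last_x : Int)
      loopA y row fuel (x.toNat + 1) (st.1 ++ [(st.2, y, x)], st.2 + 1)
    else st

def find_all_galaxies (universe_ : List String) : List (Int × Int × Int) :=
  (List.foldl
    (fun (st : List (Int × Int × Int) × Int) (p : Int × String) =>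
      loopA p.1 p.2 (p.2.toList.length + 1) 0 st)
    ([], 1) (PySem.List.enumerate universe_)).1

-- ===== PORT B =====
def find_all_galaxies_alt (universe_ : List String) : List (Int × Int × Int) :=
  (List.foldl
    (fun (st : List (Int × Int × Int) × Int) (p : Int × String) =>
      List.foldl
        (fun (st2 : List (Int × Int × Int) × Int) (q : Int × Char) =>
          if q.2 == '#' then (st2.1 ++ [(st2.2, p.1, q.1)], st2.2 + 1) else st2)
        st (PySem.List.enumerate p.2.toList))
    ([], 1) (PySem.List.enumerate universe_)).1

-- ===== PRECONDITION & SPEC =====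
def Spec_find_all_galaxies (universe_ : List String) (out : List (Int × Int × Int)) : Prop := out = find_all_galaxies_alt universe_
instance (universe_ : List String) (out : List (Int × Int × Int)) : Decidable (Spec_find_all_galaxies universe_ out) := by unfold Spec_find_all_galaxies; infer_instance

-- ===== CLAIM (what is proved, stated in full; the proofs are below) =====
def Claim_equal_find_all_galaxies : Prop := ∀ (universe_ : List String), Dom_find_all_galaxies universe_ → Spec_find_all_galaxies universe_ (find_all_galaxies universe_)

-- ===== LEMMAS AND PROOFS =====

-- mediating scan: character-by-character walk with running index
def scan (y : Int) : List Char → Nat → (List (Int × Int × Int) × Int) → (List (Int × Int × Int) × Int)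
  | [], _, st => st
  | c :: cs, x, st =>
      scan y cs (x + 1) (if c = '#' then (st.1 ++ [(st.2, y, (x : Int))], st.2 + 1) else st)

lemma scan_no_hash (y : Int) (cs : List Char) (x : Nat) (st : List (Int × Int × Int) × Int)
    (h : '#' ∉ cs) : scan y cs x st = st := by
  induction cs generalizing x st with
  | nil => rfl
  | cons c cs ih =>
    simp only [List.mem_cons, not_or] at h
    have hc : ¬ c = '#' := fun e => h.1 e.symm
    simp only [scan, if_neg hc]
    exact ih _ _ h.2

lemma scan_until (y : Int) (cs : List Char) (j x : Nat) (st : List (Int × Int × Int) × Int)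
    (hj : cs[j]? = some '#') (hmin : ∀ i < j, cs[i]? ≠ some '#') :
    scan y cs x st =
      scan y (cs.drop (j + 1)) (x + j + 1) (st.1 ++ [(st.2, y, ((x + j : Nat) : Int))], st.2 + 1) := by
  induction cs generalizing j x st with
  | nil => simp at hj
  | cons c cs ih =>
    cases j with
    | zero =>
      simp only [List.getElem?_cons_zero, Option.some.injEq] at hj
      simp [scan, hj]
    | succ j =>
      have hc : c ≠ '#' := by
        have := hmin 0 (Nat.succ_pos j)
        simpa using this
      simp only [List.getElem?_cons_succ] at hj
      have hmin' : ∀ i < j, cs[i]? ≠ some '#' := fun i hi => by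
        have := hmin (i + 1) (by omega)
        simpa using this
      simp only [scan, if_neg hc]
      rw [ih j (x + 1) _ hj hmin']
      have e1 : x + 1 + j = x + (j + 1) := by omega
      rw [e1]
      rfl

lemma loopA_eq_scan (y : Int) (row : String) (fuel k : Nat)
    (st : List (Int × Int × Int) × Int)
    (hk : k ≤ row.toList.length) (hf : row.toList.length + 1 - k ≤ fuel) :
    loopA y row fuel k st = scan y (row.toList.drop k) k st := by
  induction fuel generalizing k st with
  | zero => omega
  | succ fuel ih =>
    have hF : PySem.Str.findFrom row "#" (k : Int) =
        PySem.Chars.findFrom row.toList ['#'] (k : Int) := by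
      simp [PySem.Str.findFrom_eq]
    by_cases h : PySem.Chars.findFrom row.toList ['#'] (k : Int) = -1
    · have hnm : '#' ∉ row.toList.drop k := by
        have := (PySem.Chars.findFrom_natCast_eq_neg_one_iff row.toList ['#'] k hk).mp h
        exact fun hm => this ((List.singleton_infix_iff _ _).mpr hm)
      simp only [loopA, hF, h, ne_eq, not_true_eq_false, if_false]
      exact (scan_no_hash y _ k st hnm).symm
    · obtain ⟨hle, hpre, hmin⟩ :=
        PySem.Chars.findFrom_natCast_spec row.toList ['#'] k hk h
      set r := PySem.Chars.findFrom row.toList ['#'] (k : Int) with hr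
      have hr0 : 0 ≤ r := le_trans (by exact_mod_cast Nat.zero_le k) hle
      set j := r.toNat with hjdef
      have hrj : r = (j : Int) := (Int.toNat_of_nonneg hr0).symm
      have hkj : k ≤ j := by omega
      have h0 : (row.toList.drop j)[0]? = some '#' := by
        obtain ⟨t, ht⟩ := hpre
        rw [← ht]; rfl
      have hjlt : j < row.toList.length := by
        by_contra hge
        rw [List.drop_eq_nil_of_le (by omega)] at h0
        simp at h0
      have hjget : row.toList[j]? = some '#' := by
        rw [List.getElem?_drop] at h0
        simpa using h0
      -- unfold one step of loopA
      simp only [loopA, hF, h, ne_eq, not_false_eq_true, if_true]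
      rw [ih (j + 1) _ (by omega) (by omega)]
      -- unfold one "found" step of scan on the other side
      have hjget' : (row.toList.drop k)[j - k]? = some '#' := by
        rw [List.getElem?_drop, show k + (j - k) = j by omega]
        exact hjget
      have hmin' : ∀ i < j - k, (row.toList.drop k)[i]? ≠ some '#' := by
        intro i hi hc
        rw [List.getElem?_drop] at hc
        have hik : k + i < row.toList.length := by
          by_contra hge
          rw [List.getElem?_eq_none (by omega)] at hc
          simp at hc
        refine hmin (k + i) (by omega) (by omega) ?_
        have hch : row.toList[k + i] = '#' := by
          have := List.getElem?_eq_getElem hik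
          rw [this] at hc
          simpa using hc
        rw [List.drop_eq_getElem_cons hik, hch]
        exact ⟨_, rfl⟩
      rw [scan_until y (row.toList.drop k) (j - k) k st hjget' hmin']
      rw [List.drop_drop]
      rw [hrj]
      have e1 : j + 1 - k + (j - k + 1) = j + 1 - k + (j - k) + 1 := by omega
      have e2 : k + (j - k + 1) = j + 1 := by omega
      have e3 : k + (j - k) + 1 = j + 1 := by omega
      have e4 : k + (j - k) = j := by omega
      rw [e2, e3, e4]

-- B's inner fold equals the mediating scan
lemma foldB_eq_scan (y : Int) (cs : List Char) (x : Nat) (st : List (Int × Int × Int) × Int) :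
    List.foldl
      (fun (st2 : List (Int × Int × Int) × Int) (q : Int × Char) =>
        if q.2 == '#' then (st2.1 ++ [(st2.2, y, q.1)], st2.2 + 1) else st2)
      st (PySem.List.enumerate cs (x : Int)) = scan y cs x st := by
  induction cs generalizing x st with
  | nil => rfl
  | cons c cs ih =>
    simp only [PySem.List.enumerate, List.foldl_cons, scan]
    rw [show ((x : Int) + 1) = ((x + 1 : Nat) : Int) by push_cast; ring, ih]
    by_cases hc : c = '#' <;> simp [hc]

lemma row_step_eq (y : Int) (row : String) (st : List (Int × Int × Int) × Int) :
    loopA y row (row.toList.length + 1) 0 st =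
      List.foldl
        (fun (st2 : List (Int × Int × Int) × Int) (q : Int × Char) =>
          if q.2 == '#' then (st2.1 ++ [(st2.2, y, q.1)], st2.2 + 1) else st2)
        st (PySem.List.enumerate row.toList) := by
  rw [loopA_eq_scan y row (row.toList.length + 1) 0 st (Nat.zero_le _) (by omega)]
  have := foldB_eq_scan y row.toList 0 st
  simpa using this.symm

-- ===== VERDICT (by name: the statement is the Claim_ definition above) =====
theorem find_all_galaxies_spec : Claim_equal_find_all_galaxies := by
  intro universe_ _
  unfold Spec_find_all_galaxies find_all_galaxies find_all_galaxies_alt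
  congr 1
  exact PySem.List.foldl_congr_mem _ _ _ _ (fun st p _ => row_step_eq p.1 p.2 st)
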